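-- pv_equiv track=rewrite | github.com/adrianasousa27/ATP2022 | TPC7/TPC7.py | alunos_curso
-- ===== SOURCE A (Python) =====
-- def alunos_curso(alunos):
--     dicionario_curso = {}
--     for _,_,curso, *_ in alunos:
--         if curso in dicionario_curso.keys():
--             dicionario_curso[curso] = dicionario_curso[curso] + 1
--         else:
--             dicionario_curso[curso] = 1
--     return dicionario_curso
-- ===== SOURCE B (Python) =====
-- def alunos_curso(alunos):
--     cursos = [curso for _, _, curso, *_ in alunos]
--
--     def go(xs):
--         # partition-and-recurse: peel off the first course, count it as the
--         # number of elements removed by filtering it out, recurse on the rest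
--         if not xs:
--             return {}
--         c = xs[0]
--         rest = [x for x in xs if x != c]
--         res = {c: len(xs) - len(rest)}
--         res.update(go(rest))
--         return res
--
--     return go(cursos)
-- ===== Notes on version B (the rewrite author's own statement) =====
-- stated objective: alternative
-- what changed: Replaces A's single streaming dict accumulation with a recursive partition algorithm: peel off the first course, obtain its count as the length drop after filtering it out of the list, and recurse on the filtered remainder; no running counter is ever maintained.
import Mathlib
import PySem

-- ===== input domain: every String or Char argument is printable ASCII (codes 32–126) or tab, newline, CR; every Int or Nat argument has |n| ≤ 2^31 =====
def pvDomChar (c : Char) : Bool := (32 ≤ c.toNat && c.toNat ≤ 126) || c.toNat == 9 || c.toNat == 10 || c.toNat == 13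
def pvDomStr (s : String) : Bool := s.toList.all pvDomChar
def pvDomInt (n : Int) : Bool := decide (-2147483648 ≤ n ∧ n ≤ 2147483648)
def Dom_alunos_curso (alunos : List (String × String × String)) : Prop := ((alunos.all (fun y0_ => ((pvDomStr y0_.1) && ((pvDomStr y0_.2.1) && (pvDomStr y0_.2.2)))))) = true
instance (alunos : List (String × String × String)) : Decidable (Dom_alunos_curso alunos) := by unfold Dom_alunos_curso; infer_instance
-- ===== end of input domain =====

-- B replaces A's streaming dict accumulation with a recursive partition-and-count; same return value, similar cost (objective: alternative).

-- ===== PORT A =====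
-- Port of A: streaming fold building a counting dict; returns its items list.
def alunos_curso (alunos : List (String × String × String)) : List (String × Int) :=
  (alunos.foldl (fun d r =>
      if d.contains r.2.2 then d.insert r.2.2 (d.getD r.2.2 0 + 1)
      else d.insert r.2.2 1) (PySem.Dict.empty : PySem.Dict String Int)).items

-- ===== PORT B =====
-- Port of B's inner 'go': peel the first course, count it as the length drop
-- after filtering it out, recurse on the remainder.  The Python 'res.update(go(rest))'
-- appends only keys different from c, so it is exactly the cons below.
def alunosCursoGo : List String → List (String × Int)
  | [] => []
  | c :: t =>
      (c, ((c :: t).length : Int) - (((c :: t).filter (fun x => !(x == c))).length : Int))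
        :: alunosCursoGo ((c :: t).filter (fun x => !(x == c)))
  termination_by xs => xs.length
  decreasing_by
    simp only [List.filter_cons, beq_self_eq_true, Bool.not_true, Bool.false_eq_true, if_false]
    exact Nat.lt_succ_of_le (List.length_filter_le _ _)

def alunos_curso_alt (alunos : List (String × String × String)) : List (String × Int) :=
  alunosCursoGo (alunos.map (fun r => r.2.2))

-- ===== PRECONDITION & SPEC =====
def Spec_alunos_curso (alunos : List (String × String × String)) (out : List (String × Int)) : Prop := out = alunos_curso_alt alunos
instance (alunos : List (String × String × String)) (out : List (String × Int)) : Decidable (Spec_alunos_curso alunos out) := by unfold Spec_alunos_curso; infer_instance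

-- ===== CLAIM =====
def Claim_equal_alunos_curso : Prop := ∀ (alunos : List (String × String × String)), Dom_alunos_curso alunos → Spec_alunos_curso alunos (alunos_curso alunos)

-- ===== LEMMAS AND PROOFS =====

-- A's fold is the PySem counter of the course column.
theorem fold_eq_counter (alunos : List (String × String × String)) :
    alunos.foldl (fun d r =>
      if d.contains r.2.2 then d.insert r.2.2 (d.getD r.2.2 0 + 1)
      else d.insert r.2.2 1) (PySem.Dict.empty : PySem.Dict String Int)
    = PySem.Dict.counter (alunos.map (fun r => r.2.2)) := by
  rw [← PySem.Dict.foldl_insert_getD_add_one_eq_counter, List.foldl_map]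
  apply PySem.List.foldl_congr_mem
  intro d r _
  by_cases h : d.contains r.2.2 = true
  · simp [h]
  · have h0 : d.getD r.2.2 0 = 0 := by
      simp only [PySem.Dict.getD, PySem.Dict.contains_eq_isSome_get?] at *
      cases hg : d.get? r.2.2 <;> simp [hg] at *
    simp [h, h0]

-- folding Set.add over elements all equal to members of s changes nothing for those elements
theorem foldl_add_filter_out (c : String) :
    ∀ (t s : List String), c ∈ s →
      t.foldl PySem.Set.add s = (t.filter (fun x => !(x == c))).foldl PySem.Set.add s := by
  intro t
  induction t with
  | nil => intro s _; rfl
  | cons x xs ih =>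
      intro s hc
      by_cases hx : x = c
      · subst hx
        have hadd : PySem.Set.add s x = s := by
          simp [PySem.Set.add, PySem.Set.contains, hc]
        rw [List.foldl_cons, hadd, List.filter_cons]
        rw [if_neg (by simp)]
        exact ih s hc
      · have hmem : c ∈ PySem.Set.add s x := by
          unfold PySem.Set.add; split <;> simp [hc]
        rw [List.foldl_cons, List.filter_cons, if_pos (by simp [hx]), List.foldl_cons]
        exact ih _ hmem

-- pulling a fresh head out of a Set.add fold
theorem foldl_add_cons (c : String) :
    ∀ (ys s : List String), (∀ y ∈ ys, y ≠ c) →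
      ys.foldl PySem.Set.add (c :: s) = c :: ys.foldl PySem.Set.add s := by
  intro ys
  induction ys with
  | nil => intro s _; rfl
  | cons y t ih =>
      intro s h
      have hy : y ≠ c := h y (by simp)
      have hrec : ∀ z ∈ t, z ≠ c := fun z hz => h z (by simp [hz])
      have : PySem.Set.add (c :: s) y = c :: PySem.Set.add s y := by
        have hcont : PySem.Set.contains (c :: s) y = PySem.Set.contains s y := by
          simp [PySem.Set.contains, hy]
        unfold PySem.Set.add
        rw [hcont]
        split <;> rfl
      simp only [List.foldl_cons, this, ih _ hrec]

-- first-occurrence dedup of c :: t = c followed by dedup of t with all c's removed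
theorem ofList_cons_filter (c : String) (t : List String) :
    PySem.Set.ofList (c :: t) = c :: PySem.Set.ofList (t.filter (fun x => !(x == c))) := by
  unfold PySem.Set.ofList
  have h1 : (c :: t).foldl PySem.Set.add PySem.Set.empty
      = t.foldl PySem.Set.add [c] := by
    simp [PySem.Set.empty, PySem.Set.add, PySem.Set.contains]
  rw [h1, foldl_add_filter_out c t [c] (by simp)]
  exact foldl_add_cons c _ [] (by intro y hy; have := List.of_mem_filter hy; simpa using this)

-- B's recursion computes exactly (dedup, count) pairs
theorem go_eq_counts : ∀ (xs : List String),
    alunosCursoGo xs = (PySem.Set.ofList xs).map (fun k => (k, (xs.count k : Int))) := by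
  intro xs
  induction xs using alunosCursoGo.induct with
  | case1 => simp [alunosCursoGo, PySem.Set.ofList, PySem.Set.empty]
  | case2 c t ih =>
      rw [alunosCursoGo]
      have hfil : (c :: t).filter (fun x => !(x == c)) = t.filter (fun x => !(x == c)) := by
        simp [List.filter]
      rw [hfil] at ih ⊢
      rw [ih, ofList_cons_filter]
      have hcount : ((c :: t).length : Int) - ((t.filter (fun x => !(x == c))).length : Int)
          = ((c :: t).count c : Int) := by
        have key : ∀ (l : List String),
            (l.filter (fun x => !(x == c))).length + l.count c = l.length := by
          intro l
          induction l with
          | nil => rfl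
          | cons a l ih =>
              by_cases h : a = c
              · subst h
                simp only [List.filter_cons, List.count_cons, beq_self_eq_true,
                  Bool.not_true, Bool.false_eq_true, if_false, if_true, List.length_cons]
                omega
              · have hab : (a == c) = false := by simp [h]
                simp only [List.filter_cons, List.count_cons, hab, Bool.not_false,
                  if_true, Bool.false_eq_true, if_false, List.length_cons]
                omega
        have := key t
        simp only [List.length_cons, List.count_cons, beq_self_eq_true, if_true]
        omega
      rw [List.map_cons, hcount]
      congr 1
      apply List.map_congr_left
      intro k hk
      have hk' : k ∈ t.filter (fun x => !(x == c)) := by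
        have : k ∈ PySem.List.dedup (t.filter (fun x => !(x == c))) := by
          simpa [PySem.List.dedup] using hk
        exact (PySem.List.mem_dedup _ _).mp this
      have hkc : k ≠ c := by
        have := List.of_mem_filter hk'
        simpa using this
      have hck : ¬ c = k := fun h => hkc h.symm
      have h1 : (c :: t).count k = t.count k := by
        simp [hck]
      have h2 : (t.filter (fun x => !(x == c))).count k = t.count k := by
        rw [List.count_filter]
        simp [hkc]
      rw [h1, ← h2]

-- ===== VERDICT =====
theorem alunos_curso_spec : Claim_equal_alunos_curso := by
  intro alunos _
  unfold Spec_alunos_curso alunos_curso alunos_curso_alt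
  rw [fold_eq_counter, PySem.Dict.items_counter, go_eq_counts]
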